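-- pv_equiv track=rewrite | github.com/raa9690/Data-Mining-Class | HW4/HW_04_Alemany_Robert/HW_04_Alemany_R_Threshold_Classification.py | get_otsu
-- ===== SOURCE A (Python) =====
-- def get_otsu(thresholds, the_data):
--     # Initialize to BOGUS values:
--     best_error_count = float('inf')
--     best_threshold = None
--     threshindx = 0
--     valid_thresholds = []
--     all_error_counts = []
--     for threshold_idx in range(0, len(thresholds), 1):
--         threshold = thresholds[threshold_idx]
--
--         # count how many false positives + false negatives for all the data
--         error_count = 0
--         index_counter = 0  # small hack to let us iterate through the data_values, and get the class at that index
--         for data_value in the_data[0]: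
--             if data_value <= threshold:
--                 if the_data[1].get(index_counter) != 1:
--                     error_count += 1
--             else:
--                 if the_data[1].get(index_counter) == 1:
--                     error_count += 1
--             index_counter += 1
--
--         valid_thresholds.append(threshold)
--         all_error_counts.append(error_count)
--         if error_count <= best_error_count:
--             best_error_count = error_count
--             best_threshold = threshold
--
--     return best_threshold, valid_thresholds, all_error_counts
-- ===== SOURCE B (Python) =====
-- def get_otsu(thresholds, the_data):
--     values = the_data[0]
--     classes = the_data[1]
--     # split the values once by their class, sort each side, then answer every
--     # threshold with two binary searches instead of a full scan of the data
--     ones = sorted(v for i, v in enumerate(values) if classes.get(i) == 1)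
--     zeros = sorted(v for i, v in enumerate(values) if classes.get(i) != 1)
--     n1 = len(ones)
--
--     def rank(xs, t):
--         # number of elements <= t in the sorted list xs
--         lo, hi = 0, len(xs)
--         while lo < hi:
--             mid = (lo + hi) // 2
--             if xs[mid] <= t:
--                 lo = mid + 1
--             else:
--                 hi = mid
--         return lo
--
--     all_error_counts = []
--     best_threshold = None
--     best_error_count = None
--     for t in thresholds:
--         err = rank(zeros, t) + (n1 - rank(ones, t))
--         all_error_counts.append(err)
--         if best_error_count is None or err <= best_error_count:
--             best_error_count = err
--             best_threshold = t
--     return best_threshold, list(thresholds), all_error_counts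
-- ===== Notes on version B (the rewrite author's own statement) =====
-- stated objective: faster
-- what changed: Instead of rescanning all the data (with a dict lookup per point) for every threshold, B splits the values by class once, sorts the two sides, and answers each threshold with two binary searches over the sorted lists.
import Mathlib
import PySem

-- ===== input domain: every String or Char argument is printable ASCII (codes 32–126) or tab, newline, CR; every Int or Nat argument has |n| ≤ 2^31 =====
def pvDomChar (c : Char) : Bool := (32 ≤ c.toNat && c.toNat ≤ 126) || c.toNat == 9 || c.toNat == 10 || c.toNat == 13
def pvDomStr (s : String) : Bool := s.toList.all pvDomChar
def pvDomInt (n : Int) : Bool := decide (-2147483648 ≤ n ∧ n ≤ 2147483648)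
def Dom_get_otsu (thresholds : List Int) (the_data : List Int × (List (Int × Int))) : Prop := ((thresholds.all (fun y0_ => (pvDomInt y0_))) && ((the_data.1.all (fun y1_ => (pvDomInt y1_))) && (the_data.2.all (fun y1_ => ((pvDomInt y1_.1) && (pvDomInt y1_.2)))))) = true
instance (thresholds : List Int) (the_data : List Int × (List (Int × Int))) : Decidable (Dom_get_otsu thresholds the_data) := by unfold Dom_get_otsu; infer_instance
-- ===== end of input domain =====

-- B replaces A's per-threshold rescan of all data by a one-time class split + sort and two
-- binary searches per threshold (objective: faster). Return values are proved identical.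

-- ===== PORT A =====
-- the_data[1].get(index_counter) : dict lookup, none when the key is absent
def pvGet1 (items : List (Int × Int)) (i : Int) : Bool :=
  (PySem.Dict.mk items).get? i == some 1

-- one iteration of A's inner data loop; state = (error_count, index_counter)
def pvStepA (items : List (Int × Int)) (t : Int) (a : Int × Int) (v : Int) : Int × Int :=
  if v ≤ t then
    (if ¬ ((PySem.Dict.mk items).get? a.2 = some 1) then (a.1 + 1, a.2 + 1) else (a.1, a.2 + 1))
  else
    (if (PySem.Dict.mk items).get? a.2 = some 1 then (a.1 + 1, a.2 + 1) else (a.1, a.2 + 1))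

-- A's inner loop: error count of one threshold
def pvErrA (items : List (Int × Int)) (data : List Int) (t : Int) : Int :=
  (data.foldl (pvStepA items t) (0, 0)).1

-- 'error_count <= best_error_count' where best starts at float('inf'); none models inf
def pvLeInf (ec : Int) : Option Int → Bool
  | none => true
  | some b => decide (ec ≤ b)

-- one iteration of A's threshold loop; state = (best_error_count, best_threshold, valid_thresholds, all_error_counts)
def pvStepOuterA (items : List (Int × Int)) (data : List Int)
    (st : Option Int × Option Int × List Int × List Int) (threshold : Int) :
    Option Int × Option Int × List Int × List Int :=
  let ec := pvErrA items data threshold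
  let vt := st.2.2.1 ++ [threshold]
  let ae := st.2.2.2 ++ [ec]
  if pvLeInf ec st.1 then (some ec, some threshold, vt, ae) else (st.1, st.2.1, vt, ae)

def get_otsu (thresholds : List Int) (the_data : List Int × (List (Int × Int))) :
    Option Int × List Int × List Int :=
  let r := (PySem.List.pyRange 0 (PySem.List.len thresholds)).foldl
    (fun st j => pvStepOuterA the_data.2 the_data.1 st (PySem.List.pyGetD thresholds j 0))
    ((none : Option Int), (none : Option Int), ([] : List Int), ([] : List Int))
  (r.2.1, r.2.2.1, r.2.2.2)

-- ===== PORT B =====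
-- rank(xs, t): hand-written binary search of Source B; number of elements <= t in sorted xs.
-- xs.getD mid 0 is exact for Python xs[mid]: the search keeps 0 <= mid < hi <= len(xs).
def pvRank (xs : List Int) (t : Int) (lo hi : Nat) : Nat :=
  if _h : lo < hi then
    let mid := (lo + hi) / 2
    if xs.getD mid 0 ≤ t then pvRank xs t (mid + 1) hi else pvRank xs t lo mid
  else lo
termination_by hi - lo
decreasing_by all_goals omega

-- sorted list of the data values whose class is 1 / is not 1
def pvOnes (items : List (Int × Int)) (data : List Int) : List Int :=
  PySem.List.sorted (((PySem.List.enumerate data).filter (fun p => pvGet1 items p.1)).map (·.2))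
    (fun v => v) false

def pvZeros (items : List (Int × Int)) (data : List Int) : List Int :=
  PySem.List.sorted (((PySem.List.enumerate data).filter (fun p => !pvGet1 items p.1)).map (·.2))
    (fun v => v) false

-- one iteration of Source B's threshold loop; state = (best_error_count, best_threshold, all_error_counts)
def pvStepOuterB (zeros ones : List Int) (st : Option Int × Option Int × List Int) (t : Int) :
    Option Int × Option Int × List Int :=
  let err : Int := (pvRank zeros t 0 zeros.length : Int) +
    ((ones.length : Int) - (pvRank ones t 0 ones.length : Int))
  let ae := st.2.2 ++ [err]
  match st.1 with
  | none => (some err, some t, ae)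
  | some b => if err ≤ b then (some err, some t, ae) else (st.1, st.2.1, ae)

def get_otsu_alt (thresholds : List Int) (the_data : List Int × (List (Int × Int))) :
    Option Int × List Int × List Int :=
  let ones := pvOnes the_data.2 the_data.1
  let zeros := pvZeros the_data.2 the_data.1
  let r := thresholds.foldl (pvStepOuterB zeros ones)
    ((none : Option Int), (none : Option Int), ([] : List Int))
  (r.2.1, thresholds, r.2.2)

-- ===== PRECONDITION & SPEC =====
def Spec_get_otsu (thresholds : List Int) (the_data : List Int × (List (Int × Int))) (out : Option Int × List Int × List Int) : Prop := out = get_otsu_alt thresholds the_data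
instance (thresholds : List Int) (the_data : List Int × (List (Int × Int))) (out : Option Int × List Int × List Int) : Decidable (Spec_get_otsu thresholds the_data out) := by unfold Spec_get_otsu; infer_instance

-- ===== CLAIM (what is proved, stated in full; the proofs are below) =====
def Claim_equal_get_otsu : Prop := ∀ (thresholds : List Int) (the_data : List Int × (List (Int × Int))), Dom_get_otsu thresholds the_data → Spec_get_otsu thresholds the_data (get_otsu thresholds the_data)


-- ===== LEMMAS AND PROOFS =====

-- A's inner loop counts the mis-classified (index, value) pairs
theorem pvErrA_gen (items : List (Int × Int)) (t : Int) (data : List Int) :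
    ∀ (i0 e0 : Int), (data.foldl (pvStepA items t) (e0, i0)).1 =
      e0 + ((PySem.List.enumerate data i0).countP
        (fun p => if p.2 ≤ t then !pvGet1 items p.1 else pvGet1 items p.1) : Int) := by
  induction data with
  | nil => simp [PySem.List.enumerate]
  | cons v rest ih =>
    intro i0 e0
    rw [PySem.List.enumerate_cons]
    by_cases hv : v ≤ t <;> by_cases hg : (PySem.Dict.mk items).get? i0 = some 1 <;>
      simp [List.foldl_cons, pvStepA, hv, hg, ih, pvGet1] <;> omega

-- the terminal state of the binary search names the count of elements ≤ t
theorem pv_terminal (xs : List Int) (t : Int) (lo : Nat) (hlo : lo ≤ xs.length)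
    (h1 : ∀ a ∈ xs.take lo, a ≤ t) (h2 : ∀ a ∈ xs.drop lo, t < a) :
    lo = xs.countP (fun v => decide (v ≤ t)) := by
  have c1 : (List.take lo xs).countP (fun v => decide (v ≤ t)) = lo := by
    rw [List.countP_eq_length.2 (by intro a ha; simpa using h1 a ha)]
    rw [List.length_take]; omega
  have c2 : (List.drop lo xs).countP (fun v => decide (v ≤ t)) = 0 := by
    rw [List.countP_eq_zero]; intro a ha; simpa using not_le.2 (h2 a ha)
  rw [← List.take_append_drop lo xs, List.countP_append, c1, c2]
  omega

-- binary-search invariant: everything left of lo is ≤ t, everything from hi on is > t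
theorem pvRank_inv (xs : List Int) (t : Int) (hs : xs.Pairwise (fun a b => a ≤ b)) :
    ∀ (n lo hi : Nat), hi - lo ≤ n → lo ≤ hi → hi ≤ xs.length →
      (∀ a ∈ xs.take lo, a ≤ t) → (∀ a ∈ xs.drop hi, t < a) →
      pvRank xs t lo hi = xs.countP (fun v => decide (v ≤ t)) := by
  intro n
  induction n with
  | zero =>
    intro lo hi hn hlh hhl h1 h2
    have he : lo = hi := by omega
    rw [pvRank]
    simp only [show ¬ lo < hi by omega, dif_neg, not_false_iff]
    subst he
    exact pv_terminal xs t lo hhl h1 h2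
  | succ n ih =>
    intro lo hi hn hlh hhl h1 h2
    rw [pvRank]
    by_cases hlt : lo < hi
    · simp only [dif_pos hlt]
      have hmid : (lo + hi) / 2 < hi := by omega
      have hmlen : (lo + hi) / 2 < xs.length := by omega
      have hget : xs.getD ((lo + hi) / 2) 0 = xs[(lo + hi) / 2] := List.getD_eq_getElem xs 0 hmlen
      have hmono : ∀ (i j : Nat) (hi' : i < xs.length) (hj : j < xs.length), i ≤ j → xs[i] ≤ xs[j] := by
        intro i j hi' hj hij
        rcases Nat.lt_or_ge i j with h | h
        · exact List.pairwise_iff_getElem.1 hs i j hi' hj h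
        · have : i = j := by omega
          subst this; rfl
      by_cases hc : xs.getD ((lo + hi) / 2) 0 ≤ t
      · simp only [if_pos hc]
        apply ih ((lo+hi)/2 + 1) hi (by omega) (by omega) hhl
        · intro a ha
          rw [List.mem_take_iff_getElem] at ha
          obtain ⟨j, hj, rfl⟩ := ha
          calc xs[j] ≤ xs[(lo+hi)/2] := hmono _ _ _ _ (by omega)
            _ ≤ t := by rwa [hget] at hc
        · exact h2
      · simp only [if_neg hc]
        have h2' : ∀ a ∈ xs.drop ((lo+hi)/2), t < a := by
          intro a ha
          rw [List.mem_drop_iff_getElem] at ha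
          obtain ⟨j, hj, rfl⟩ := ha
          have hb : t < xs[(lo+hi)/2] := by rw [hget] at hc; exact not_le.1 hc
          exact lt_of_lt_of_le hb (hmono _ _ hmlen (by omega) (by omega))
        exact ih lo ((lo+hi)/2) (by omega) (by omega) (by omega) h1 h2'
    · simp only [dif_neg hlt]
      have he : lo = hi := by omega
      subst he
      exact pv_terminal xs t lo hhl h1 h2

-- on a sorted list, pvRank counts the elements ≤ t
theorem pvRank_countP (xs : List Int) (t : Int)
    (hs : xs.Pairwise (fun a b => a ≤ b)) :
    pvRank xs t 0 xs.length = xs.countP (fun v => decide (v ≤ t)) :=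
  pvRank_inv xs t hs xs.length 0 xs.length (by omega) (by omega) le_rfl (by simp) (by simp)

-- sorting does not change the count
theorem pv_sorted_countP (xs : List Int) (t : Int) :
    (PySem.List.sorted xs (fun v => v) false).countP (fun v => decide (v ≤ t)) =
      xs.countP (fun v => decide (v ≤ t)) :=
  (PySem.List.sorted_perm xs (fun v => v) false).countP_eq _

-- error-count bookkeeping: misclassifications vs the four (≤ t, class-1) count combinations
theorem pv_counts (items : List (Int × Int)) (t : Int) (l : List (Int × Int)) :
    l.countP (fun p => if p.2 ≤ t then !pvGet1 items p.1 else pvGet1 items p.1) +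
      l.countP (fun p => decide (p.2 ≤ t) && pvGet1 items p.1) =
    l.countP (fun p => decide (p.2 ≤ t) && !pvGet1 items p.1) +
      l.countP (fun p => pvGet1 items p.1) := by
  induction l with
  | nil => simp
  | cons x xs ih =>
    by_cases h1 : x.2 ≤ t <;> by_cases h2 : pvGet1 items x.1 <;>
      simp [h1, h2] <;> omega

-- the two per-threshold error computations agree
theorem pvErr_eq (items : List (Int × Int)) (data : List Int) (t : Int) :
    pvErrA items data t =
      (pvRank (pvZeros items data) t 0 (pvZeros items data).length : Int) +
        (((pvOnes items data).length : Int) - (pvRank (pvOnes items data) t 0 (pvOnes items data).length : Int)) := by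
  have hz : pvRank (pvZeros items data) t 0 (pvZeros items data).length =
      (PySem.List.enumerate data 0).countP (fun p => decide (p.2 ≤ t) && !pvGet1 items p.1) := by
    simp only [pvZeros]
    rw [pvRank_countP _ _ (PySem.List.sorted_pairwise _ _), pv_sorted_countP,
      List.countP_map, List.countP_filter]
    apply List.countP_congr; intro p _; simp [Function.comp]
  have ho : pvRank (pvOnes items data) t 0 (pvOnes items data).length =
      (PySem.List.enumerate data 0).countP (fun p => decide (p.2 ≤ t) && pvGet1 items p.1) := by
    simp only [pvOnes]
    rw [pvRank_countP _ _ (PySem.List.sorted_pairwise _ _), pv_sorted_countP,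
      List.countP_map, List.countP_filter]
    apply List.countP_congr; intro p _; simp [Function.comp]
  have hlen : (pvOnes items data).length =
      (PySem.List.enumerate data 0).countP (fun p => pvGet1 items p.1) := by
    simp only [pvOnes]
    rw [PySem.List.length_sorted, List.length_map, List.countP_eq_length_filter]
  have hmono : (PySem.List.enumerate data 0).countP (fun p => decide (p.2 ≤ t) && pvGet1 items p.1) ≤
      (PySem.List.enumerate data 0).countP (fun p => pvGet1 items p.1) := by
    apply List.countP_mono_left; intro x _ hx
    simp only [Bool.and_eq_true] at hx; exact hx.2
  have hQ := pvErrA_gen items t data 0 0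
  have hc := pv_counts items t (PySem.List.enumerate data 0)
  rw [pvErrA, hQ, hz, ho, hlen]
  omega

-- the two threshold folds are related: A additionally accumulates the thresholds themselves
theorem pv_fold_rel (items : List (Int × Int)) (data : List Int) (ts : List Int) :
    ∀ (b bt : Option Int) (vs es : List Int),
      ts.foldl (pvStepOuterA items data) (b, bt, vs, es) =
        ((ts.foldl (pvStepOuterB (pvZeros items data) (pvOnes items data)) (b, bt, es)).1,
         (ts.foldl (pvStepOuterB (pvZeros items data) (pvOnes items data)) (b, bt, es)).2.1,
         vs ++ ts,
         (ts.foldl (pvStepOuterB (pvZeros items data) (pvOnes items data)) (b, bt, es)).2.2) := by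
  induction ts with
  | nil => simp
  | cons t ts ih =>
    intro b bt vs es
    have hstep : pvStepOuterA items data (b, bt, vs, es) t =
        (let s := pvStepOuterB (pvZeros items data) (pvOnes items data) (b, bt, es) t
         (s.1, s.2.1, vs ++ [t], s.2.2)) := by
      have hE := pvErr_eq items data t
      cases b with
      | none => simp [pvStepOuterA, pvStepOuterB, pvLeInf, hE]
      | some bv =>
        by_cases hle : pvErrA items data t ≤ bv <;>
          rw [hE] at hle <;>
          simp [pvStepOuterA, pvStepOuterB, pvLeInf, hE, hle]
    rw [List.foldl_cons, List.foldl_cons, hstep, ih]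
    simp

-- ===== VERDICT (by name: the statement is the Claim_ definition above) =====
theorem get_otsu_spec : Claim_equal_get_otsu := by
  intro thresholds the_data _
  unfold Spec_get_otsu get_otsu get_otsu_alt
  rw [PySem.List.foldl_pyRange_pyGetD thresholds 0 _ _ le_rfl]
  simp only [Int.toNat_zero, List.drop_zero]
  rw [pv_fold_rel the_data.2 the_data.1 thresholds]
  simp
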